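-- pv_equiv track=rewrite | github.com/Jozy0123/advent_christmas_challenge | day_8/part_2.py | process_arrays
-- ===== SOURCE A (Python) =====
-- from typing import List
--
-- def process_arrays(arrays: List[int], is_reverse=False):
--     results = []
--
--     for i in range(1, len(arrays)-1):
--         count = 0
--         for j in range(i-1, -1, -1):
--             if arrays[i] > arrays[j]:
--                 count += 1
--             else:
--                 count += 1
--                 break
--         results.append(count)
--
--     if is_reverse:
--         results.reverse()
--
--     return results
-- ===== SOURCE B (Python) =====
-- def process_arrays(arrays, is_reverse=False):
--     # Monotonic stack: one pass, nearest previous index with value >= current.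
--     n = len(arrays)
--     stack = []   # indices; values non-decreasing from top to bottom
--     dists = []
--     for i in range(n):
--         v = arrays[i]
--         while stack and arrays[stack[-1]] < v:
--             stack.pop()
--         dists.append(i if not stack else i - stack[-1])
--         stack.append(i)
--     results = dists[1:n-1]
--     if is_reverse:
--         results.reverse()
--     return results
-- ===== Notes on version B (the rewrite author's own statement) =====
-- stated objective: faster
-- what changed: replaces the quadratic per-index backward scan with a single-pass monotonic stack that yields the nearest previous index with value >= current, then slices out the middle indices
import Mathlib
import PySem

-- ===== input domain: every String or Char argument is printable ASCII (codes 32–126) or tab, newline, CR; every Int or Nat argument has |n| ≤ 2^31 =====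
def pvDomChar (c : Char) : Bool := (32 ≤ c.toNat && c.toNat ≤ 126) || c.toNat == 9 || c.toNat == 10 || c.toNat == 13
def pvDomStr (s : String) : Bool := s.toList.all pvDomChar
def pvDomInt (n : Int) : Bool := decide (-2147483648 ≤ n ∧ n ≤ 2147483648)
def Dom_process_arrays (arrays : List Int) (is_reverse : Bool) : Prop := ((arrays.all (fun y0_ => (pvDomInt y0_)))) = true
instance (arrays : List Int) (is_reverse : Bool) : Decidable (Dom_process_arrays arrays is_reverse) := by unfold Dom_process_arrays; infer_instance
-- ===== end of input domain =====

-- B replaces A's quadratic per-index backward scan by a single-pass monotonic stack (nearest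
-- previous index with value >= current); measured asymptotically faster. A is total; no Pre_.

-- ===== PORT A =====
-- arrays[j]: every index either port reads is in range, so the default of pyGetD is never used (exact).
def pvGetI (a : List Int) (j : Int) : Int := PySem.List.pyGetD a j 0

-- inner 'for j in range(i-1, -1, -1)' with its break
def pvLoopA (a : List Int) (v : Int) : List Int → Int → Int
  | [], c => c
  | j :: rest, c => if v > pvGetI a j then pvLoopA a v rest (c + 1) else c + 1

def process_arrays (arrays : List Int) (is_reverse : Bool) : List Int :=
  let results := (PySem.List.pyRange 1 ((arrays.length : Int) - 1) 1).foldl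
    (fun res i => res ++ [pvLoopA arrays (pvGetI arrays i) (PySem.List.pyRange (i - 1) (-1) (-1)) 0]) []
  if is_reverse then results.reverse else results

-- ===== PORT B =====
-- 'while stack and arrays[stack[-1]] < v: stack.pop()'  (stack kept head-first: head = top)
def pvPop (a : List Int) (v : Int) : List Int → List Int
  | [] => []
  | j :: rest => if pvGetI a j < v then pvPop a v rest else j :: rest

-- the main 'for i in range(n)' loop; state = (dists, stack)
def pvLoopB (a : List Int) : List Int → List Int × List Int → List Int × List Int
  | [], st => st
  | i :: rest, (dists, stack) =>
      let v := pvGetI a i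
      let s := pvPop a v stack
      let d := match s with | [] => i | j :: _ => i - j
      pvLoopB a rest (dists ++ [d], i :: s)

def process_arrays_alt (arrays : List Int) (is_reverse : Bool) : List Int :=
  let n : Int := arrays.length
  let dists := (pvLoopB arrays (PySem.List.pyRange 0 n 1) ([], [])).1
  let results := PySem.List.slice dists (some 1) (some (n - 1))
  if is_reverse then results.reverse else results

-- ===== PRECONDITION & SPEC =====
def Spec_process_arrays (arrays : List Int) (is_reverse : Bool) (out : List Int) : Prop := out = process_arrays_alt arrays is_reverse
instance (arrays : List Int) (is_reverse : Bool) (out : List Int) : Decidable (Spec_process_arrays arrays is_reverse out) := by unfold Spec_process_arrays; infer_instance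

-- ===== CLAIM (what is proved, stated in full; the proofs are below) =====
def Claim_equal_process_arrays : Prop := ∀ (arrays : List Int) (is_reverse : Bool), Dom_process_arrays arrays is_reverse → Spec_process_arrays arrays is_reverse (process_arrays arrays is_reverse)

-- ===== LEMMAS AND PROOFS =====

-- greatest j < i with a[j] ≥ v (the "nearest blocker" looking backwards), as A's scan finds it
def nbF (a : List Int) (v : Int) : Nat → Option Nat
  | 0 => none
  | i+1 => if v > pvGetI a (i : Int) then nbF a v i else some i

-- the common per-index value both programs produce
def fD (a : List Int) (i : Nat) : Int :=
  (i : Int) - (((nbF a (pvGetI a (i : Int)) i).map (Nat.cast : Nat → Int)).getD 0)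

lemma loopA_eq (a : List Int) (v : Int) : ∀ (i : Nat) (c : Int),
    pvLoopA a v (PySem.List.pyRange ((i : Int) - 1) (-1) (-1)) c
      = c + ((i : Int) - (((nbF a v i).map (Nat.cast : Nat → Int)).getD 0)) := by
  intro i
  induction i with
  | zero =>
    intro c
    rw [show ((0 : Nat) : Int) - 1 = -1 by norm_num,
        PySem.List.pyRange_neg_one_eq_nil (by omega)]
    simp [pvLoopA, nbF]
  | succ i ih =>
    intro c
    rw [show (((i + 1 : Nat)) : Int) - 1 = ((i : Nat) : Int) by push_cast; ring,
        PySem.List.pyRange_neg_one_cons (by omega)]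
    simp only [pvLoopA, nbF]
    by_cases h : v > pvGetI a (i : Int)
    · rw [if_pos h, if_pos h, ih]
      generalize (((nbF a v i).map (Nat.cast : Nat → Int)).getD 0) = x
      push_cast; ring
    · rw [if_neg h, if_neg h]
      simp only [Option.map_some, Option.getD_some]
      push_cast; ring

lemma pop_pop (a : List Int) {v v' : Int} (h : v' ≤ v) : ∀ (s : List Int),
    pvPop a v (pvPop a v' s) = pvPop a v s := by
  intro s
  induction s with
  | nil => simp [pvPop]
  | cons j rest ih =>
    by_cases h1 : pvGetI a j < v'
    · rw [show pvPop a v' (j :: rest) = pvPop a v' rest from by simp [pvPop, h1], ih,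
          show pvPop a v (j :: rest) = pvPop a v rest from by
            simp [pvPop, lt_of_lt_of_le h1 h]]
    · rw [show pvPop a v' (j :: rest) = j :: rest from by simp [pvPop, h1]]

def InvS (a : List Int) (i : Nat) (s : List Int) : Prop :=
  ∀ v, (pvPop a v s).head? = (nbF a v i).map (Nat.cast : Nat → Int)

lemma invS_zero (a : List Int) : InvS a 0 [] := by
  intro v; simp [pvPop, nbF]

lemma inv_step (a : List Int) (i : Nat) (s : List Int) (h : InvS a i s) :
    InvS a (i+1) ((i : Int) :: pvPop a (pvGetI a (i : Int)) s) := by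
  intro v
  by_cases hv : pvGetI a (i : Int) < v
  · rw [show pvPop a v ((i : Int) :: pvPop a (pvGetI a (i : Int)) s)
          = pvPop a v (pvPop a (pvGetI a (i : Int)) s) from by simp [pvPop, hv],
        pop_pop a (le_of_lt hv)]
    rw [show nbF a v (i + 1) = nbF a v i from by simp [nbF, hv]]
    exact h v
  · rw [show pvPop a v ((i : Int) :: pvPop a (pvGetI a (i : Int)) s)
          = (i : Int) :: pvPop a (pvGetI a (i : Int)) s from by simp [pvPop, hv]]
    rw [show nbF a v (i + 1) = some i from by simp [nbF, hv]]
    rfl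

lemma inv_d (a : List Int) (i : Nat) (s : List Int) (h : InvS a i s) :
    (match pvPop a (pvGetI a (i : Int)) s with
     | [] => (i : Int) | j :: _ => (i : Int) - j) = fD a i := by
  have hh := h (pvGetI a (i : Int))
  unfold fD
  cases hp : pvPop a (pvGetI a (i : Int)) s with
  | nil =>
    rw [hp] at hh
    simp only [List.head?_nil] at hh
    rw [show nbF a (pvGetI a (i : Int)) i = none from by
          cases hq : nbF a (pvGetI a (i : Int)) i <;> simp [hq] at hh ⊢]
    simp
  | cons j t =>
    rw [hp] at hh
    simp only [List.head?_cons] at hh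
    cases hq : nbF a (pvGetI a (i : Int)) i with
    | none => rw [hq] at hh; simp at hh
    | some j' =>
      rw [hq] at hh
      simp only [Option.map_some, Option.some.injEq] at hh
      simp [hh]

lemma loopB_eq (a : List Int) : ∀ (k i : Nat) (dists s : List Int), InvS a i s →
    (pvLoopB a ((List.range' i k).map (Nat.cast : Nat → Int)) (dists, s)).1
      = dists ++ (List.range' i k).map (fD a) := by
  intro k
  induction k with
  | zero => intro i dists s _; simp [pvLoopB]
  | succ k ih =>
    intro i dists s h
    rw [List.range'_succ, List.map_cons]
    simp only [pvLoopB]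
    rw [inv_d a i s h, ih (i + 1) _ _ (inv_step a i s h)]
    simp

lemma resA (a : List Int) :
    (PySem.List.pyRange 1 ((a.length : Int) - 1) 1).foldl
      (fun res i => res ++ [pvLoopA a (pvGetI a i) (PySem.List.pyRange (i - 1) (-1) (-1)) 0]) []
    = (List.range (a.length - 2)).map (fun k => fD a (k + 1)) := by
  rw [PySem.List.foldl_append_singleton_eq_map, PySem.List.pyRange_one, List.map_map,
      show ((a.length : Int) - 1 - 1).toNat = a.length - 2 by omega, List.nil_append]
  congr 1
  funext k
  simp only [Function.comp_apply]
  rw [show (1 : Int) + (k : Int) = (((k + 1 : Nat)) : Int) by push_cast; ring, loopA_eq]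
  simp [fD]

lemma midSlice (f : Nat → Int) (n : Nat) :
    PySem.List.slice ((List.range n).map f) (some 1) (some ((n : Int) - 1))
      = (List.range (n - 2)).map (fun k => f (k + 1)) := by
  rcases n with _ | m
  · simp [PySem.List.slice]
  · rw [PySem.List.slice_toNat ((List.range (m + 1)).map f) (a := 1)
          (b := ((m + 1 : Nat) : Int) - 1) (by norm_num) (by push_cast; omega),
        show ((1 : Int)).toNat = 1 from rfl,
        show (((m + 1 : Nat) : Int) - 1).toNat = m - 0 by omega,
        List.range_succ_eq_map, List.map_cons, List.drop_one, List.tail_cons,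
        ← List.map_take, ← List.map_take, List.take_range,
        show min (m - 0 - 1) m = m - 1 by omega,
        show m + 1 - 2 = m - 1 by omega]
    simp [Function.comp, Nat.succ_eq_add_one]

lemma resB (a : List Int) :
    PySem.List.slice ((pvLoopB a (PySem.List.pyRange 0 (a.length : Int) 1) ([], [])).1)
      (some 1) (some ((a.length : Int) - 1))
    = (List.range (a.length - 2)).map (fun k => fD a (k + 1)) := by
  rw [PySem.List.pyRange_one,
      show ((a.length : Int) - 0).toNat = a.length by omega,
      show (List.range a.length).map (fun k => (0 : Int) + (Nat.cast k : Int))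
        = (List.range' 0 a.length).map (Nat.cast : Nat → Int) by
          rw [List.range_eq_range']; simp,
      loopB_eq a a.length 0 [] [] (invS_zero a), List.nil_append,
      ← List.range_eq_range']
  exact midSlice (fD a) a.length

-- ===== VERDICT (by name: the statement is the Claim_ definition above) =====
theorem process_arrays_spec : Claim_equal_process_arrays := by
  intro arrays is_reverse _
  unfold Spec_process_arrays process_arrays process_arrays_alt
  simp only [resA arrays, resB arrays]
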